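-- pv_equiv track=rewrite | github.com/ArsenySamoylov/h-courses | llvm/hw2/scripts/analyze.py | find_top_patterns
-- ===== SOURCE A (Python) =====
-- from collections import Counter
--
-- def extract_patterns(trace_lines: list, pattern_length: int) -> list:
--     patterns = []
--
--     for i in range(len(trace_lines) - pattern_length + 1):
--         pattern = '\n'.join(trace_lines[i:i + pattern_length])
--         patterns.append(pattern)
--
--     return patterns
--
-- def find_top_patterns(trace_lines: list, max_pattern_length: int) -> dict:
--     all_patterns = {}
--
--     for length in range(1, max_pattern_length + 1):
--         patterns = extract_patterns(trace_lines, length)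
--         pattern_counter = Counter(patterns)
--         top_patterns = pattern_counter.most_common(5)
--         all_patterns[length] = top_patterns
--
--     return all_patterns
-- ===== SOURCE B (Python) =====
-- from collections import Counter
--
-- def find_top_patterns(trace_lines: list, max_pattern_length: int) -> dict:
--     all_patterns = {}
--     n = len(trace_lines)
--     prev = []
--     for length in range(1, max_pattern_length + 1):
--         if length == 1:
--             windows = list(trace_lines)
--         else:
--             windows = [prev[i] + '\n' + trace_lines[i + length - 1]
--                        for i in range(n - length + 1)]
--         all_patterns[length] = Counter(windows).most_common(5)
--         prev = windows
--     return all_patterns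
-- ===== Notes on version B (the rewrite author's own statement) =====
-- stated objective: faster
-- what changed: B builds each length-L window incrementally as prev[i] + '\n' + trace_lines[i+L-1] from the stored length-(L-1) windows, instead of re-slicing the list and re-joining all L lines of every window from scratch at each length.
import Mathlib
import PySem

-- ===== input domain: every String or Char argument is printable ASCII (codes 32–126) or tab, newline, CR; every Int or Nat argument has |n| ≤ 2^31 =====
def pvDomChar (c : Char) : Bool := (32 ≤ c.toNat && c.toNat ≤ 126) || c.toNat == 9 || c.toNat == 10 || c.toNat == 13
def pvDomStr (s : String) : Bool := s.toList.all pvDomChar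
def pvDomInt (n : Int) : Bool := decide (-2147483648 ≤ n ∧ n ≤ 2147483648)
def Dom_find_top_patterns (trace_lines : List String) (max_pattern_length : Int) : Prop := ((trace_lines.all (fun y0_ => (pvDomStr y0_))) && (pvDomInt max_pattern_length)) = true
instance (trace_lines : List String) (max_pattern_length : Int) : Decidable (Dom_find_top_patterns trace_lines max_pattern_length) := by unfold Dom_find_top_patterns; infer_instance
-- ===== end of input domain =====

-- B builds each length-L window from the stored length-(L-1) window plus one line instead of
-- re-slicing and re-joining the list for every window (different decomposition; same results).

-- ===== PORT A =====
-- Counter(xs).most_common(5): stable sort of the counter's items by count, descending, first 5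
-- (library call made identically by A and B, so shared by both ports).
def pvMostCommon5 (xs : List String) : List (String × Int) :=
  (PySem.List.sorted (PySem.Dict.counter xs).items (fun p => p.2) true).take 5

def pvExtractPatterns (trace_lines : List String) (pattern_length : Int) : List String :=
  (PySem.List.pyRange 0 ((trace_lines.length : Int) - pattern_length + 1)).foldl
    (fun patterns i =>
      patterns ++ [PySem.Str.join "\n" (PySem.List.slice trace_lines (some i) (some (i + pattern_length)))])
    []

def find_top_patterns (trace_lines : List String) (max_pattern_length : Int) : List (Int × List (String × Int)) :=
  ((PySem.List.pyRange 1 (max_pattern_length + 1)).foldl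
    (fun all_patterns length =>
      all_patterns.insert length (pvMostCommon5 (pvExtractPatterns trace_lines length)))
    (PySem.Dict.empty : PySem.Dict Int (List (String × Int)))).items

-- ===== PORT B =====
-- one iteration of B's loop: state = (all_patterns so far, prev = previous level's windows)
def pvAltStep (trace_lines : List String)
    (st : PySem.Dict Int (List (String × Int)) × List String) (length : Int) :
    PySem.Dict Int (List (String × Int)) × List String :=
  let windows : List String :=
    if length == 1 then trace_lines
    else
      (PySem.List.pyRange 0 ((trace_lines.length : Int) - length + 1)).foldl
        (fun ws i =>
          ws ++ [((PySem.List.pyGet? st.2 i).getD "") ++ "\n" ++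
                 ((PySem.List.pyGet? trace_lines (i + length - 1)).getD "")])
        []
  (st.1.insert length (pvMostCommon5 windows), windows)

def find_top_patterns_alt (trace_lines : List String) (max_pattern_length : Int) : List (Int × List (String × Int)) :=
  (((PySem.List.pyRange 1 (max_pattern_length + 1)).foldl (pvAltStep trace_lines)
      ((PySem.Dict.empty : PySem.Dict Int (List (String × Int))), ([] : List String))).1).items

-- ===== PRECONDITION & SPEC =====
def Spec_find_top_patterns (trace_lines : List String) (max_pattern_length : Int) (out : List (Int × List (String × Int))) : Prop := out = find_top_patterns_alt trace_lines max_pattern_length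
instance (trace_lines : List String) (max_pattern_length : Int) (out : List (Int × List (String × Int))) : Decidable (Spec_find_top_patterns trace_lines max_pattern_length out) := by unfold Spec_find_top_patterns; infer_instance

-- ===== CLAIM (what is proved, stated in full; the proofs are below) =====
def Claim_equal_find_top_patterns : Prop := ∀ (trace_lines : List String) (max_pattern_length : Int), Dom_find_top_patterns trace_lines max_pattern_length → Spec_find_top_patterns trace_lines max_pattern_length (find_top_patterns trace_lines max_pattern_length)

-- ===== LEMMAS AND PROOFS =====

theorem pv_foldl_append_map {α β : Type} (f : α → β) :
    ∀ (xs : List α) (acc : List β), xs.foldl (fun a x => a ++ [f x]) acc = acc ++ xs.map f := by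
  intro xs
  induction xs with
  | nil => intro acc; simp
  | cons x xs ih => intro acc; simp [List.foldl, ih]

theorem pv_chars_join_append_last (sep : List Char) :
    ∀ (qs : List (List Char)) (q : List Char), qs ≠ [] →
      PySem.Chars.join sep (qs ++ [q]) = PySem.Chars.join sep qs ++ sep ++ q := by
  intro qs
  induction qs with
  | nil => intro q h; exact absurd rfl h
  | cons p rest ih =>
    intro q _
    cases rest with
    | nil => simp [PySem.Chars.join_cons_cons, PySem.Chars.join_singleton]
    | cons r rest' =>
      have := ih q (by simp)
      simp only [List.cons_append, PySem.Chars.join_cons_cons] at this ⊢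
      simp [this]

theorem pv_join_append_last (ps : List String) (s : String) (h : ps ≠ []) :
    PySem.Str.join "\n" (ps ++ [s]) = PySem.Str.join "\n" ps ++ "\n" ++ s := by
  apply String.toList_inj.mp
  simp only [String.toList_append, PySem.Str.toList_join, List.map_append, List.map_cons,
    List.map_nil]
  exact pv_chars_join_append_last _ _ _ (by simpa using h)

theorem pv_join_singleton (s : String) : PySem.Str.join "\n" [s] = s := by
  apply String.toList_inj.mp
  simp [PySem.Str.toList_join, PySem.Chars.join_singleton]

theorem pv_join_take_succ (l : List String) (t : Nat) (h1 : 1 ≤ t) (h2 : t < l.length) :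
    PySem.Str.join "\n" (l.take (t + 1)) = PySem.Str.join "\n" (l.take t) ++ "\n" ++ l[t] := by
  rw [List.take_succ]
  have hs : l[t]? = some l[t] := List.getElem?_eq_getElem h2
  rw [hs]
  refine pv_join_append_last _ _ ?_
  intro hnil
  rcases List.take_eq_nil_iff.mp hnil with h | h
  · omega
  · rw [h] at h2; simp at h2

theorem pv_extract_eq_map (tl : List String) (L : Int) :
    pvExtractPatterns tl L =
      (PySem.List.pyRange 0 ((tl.length : Int) - L + 1)).map
        (fun i => PySem.Str.join "\n" (PySem.List.slice tl (some i) (some (i + L)))) := by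
  unfold pvExtractPatterns
  rw [pv_foldl_append_map]
  simp

theorem pv_extract_one (tl : List String) : pvExtractPatterns tl 1 = tl := by
  rw [pv_extract_eq_map]
  have hb : ((tl.length : Int) - 1 + 1) = (tl.length : Int) := by ring
  rw [hb, PySem.List.pyRange_one]
  simp only [Int.sub_zero, Int.toNat_natCast, List.map_map]
  apply List.ext_getElem
  · simp
  · intro j hj _
    simp only [List.getElem_map, List.getElem_range, Function.comp]
    have hjl : j < tl.length := by simpa using hj
    simp only [zero_add]
    have hc : ((j : Int) + 1) = ((j + 1 : Nat) : Int) := by push_cast; ring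
    rw [hc, PySem.List.slice_natCast]
    have ht : j + 1 - j = 1 := by omega
    rw [ht]
    have h1 : List.take 1 (List.drop j tl) = [tl[j]] := by
      rw [show (1 : Nat) = 0 + 1 from rfl, List.take_succ]
      simp [List.getElem?_drop, List.getElem?_eq_getElem hjl]
    rw [h1, pv_join_singleton]

-- one level of B reproduces A's extract_patterns when prev is the previous level
theorem pv_windows_step (tl : List String) (L : Int) (hL : 2 ≤ L) :
    (PySem.List.pyRange 0 ((tl.length : Int) - L + 1)).foldl
      (fun ws i =>
        ws ++ [((PySem.List.pyGet? (pvExtractPatterns tl (L - 1)) i).getD "") ++ "\n" ++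
               ((PySem.List.pyGet? tl (i + L - 1)).getD "")])
      [] = pvExtractPatterns tl L := by
  rw [pv_foldl_append_map]
  rw [pv_extract_eq_map tl L]
  simp only [List.nil_append]
  apply List.map_congr_left
  intro i hi
  have hmem := (PySem.List.mem_pyRange_one).mp hi
  obtain ⟨hi0, hiub⟩ := hmem
  -- names
  set n := tl.length with hn
  have l1 : Nat := (L - 1).toNat
  set j := i.toNat with hj
  have hij : (j : Int) = i := Int.toNat_of_nonneg hi0
  set l1 := (L - 1).toNat with hl1
  have hll : (l1 : Int) = L - 1 := Int.toNat_of_nonneg (by omega)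
  have hjl1 : j + l1 < n := by omega
  have hl1n : l1 ≤ n := by omega
  -- prev lookup
  have hprev : pvExtractPatterns tl (L - 1) =
      (PySem.List.pyRange 0 (((n - l1 + 1 : Nat) : Int))).map
        (fun i' => PySem.Str.join "\n" (PySem.List.slice tl (some i') (some (i' + (L - 1))))) := by
    rw [pv_extract_eq_map]
    congr 2
    omega
  have hjlt : j < n - l1 + 1 := by omega
  have hget1 : PySem.List.pyGet? (pvExtractPatterns tl (L - 1)) i =
      some (PySem.Str.join "\n" (PySem.List.slice tl (some (j : Int)) (some ((j : Int) + (L - 1))))) := by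
    rw [hprev, ← hij, PySem.List.pyGet?_natCast,
      PySem.List.getElem?_map_pyRange_zero _ _ _ hjlt]
  have hget2 : PySem.List.pyGet? tl (i + L - 1) = tl[j + l1]? := by
    have : i + L - 1 = ((j + l1 : Nat) : Int) := by push_cast; omega
    rw [this, PySem.List.pyGet?_natCast]
  rw [hget1, hget2, List.getElem?_eq_getElem hjl1]
  simp only [Option.getD_some]
  -- now string equality
  have hs1 : PySem.List.slice tl (some (j : Int)) (some ((j : Int) + (L - 1))) =
      List.take l1 (List.drop j tl) := by
    have : (j : Int) + (L - 1) = ((j + l1 : Nat) : Int) := by push_cast; omega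
    rw [this, PySem.List.slice_natCast]
    congr 1
    omega
  have hs2 : PySem.List.slice tl (some (j : Int)) (some ((j : Int) + L)) =
      List.take (l1 + 1) (List.drop j tl) := by
    have h2 : ((j : Int) + L) = ((j + l1 + 1 : Nat) : Int) := by push_cast; omega
    rw [h2, PySem.List.slice_natCast]
    congr 1
    omega
  rw [← hij, hs1, hs2]
  have hlen : l1 < (List.drop j tl).length := by simp [List.length_drop]; omega
  rw [pv_join_take_succ _ l1 (by omega) hlen]
  congr 1
  simp [List.getElem_drop]

-- loop invariant: after processing lengths 1..k+1, B's dict equals A's and prev is level k+1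
theorem pv_fold_inv (tl : List String) :
    ∀ (k : Nat),
      (PySem.List.pyRange 1 ((k : Int) + 2)).foldl (pvAltStep tl)
          ((PySem.Dict.empty : PySem.Dict Int (List (String × Int))), ([] : List String)) =
        ((PySem.List.pyRange 1 ((k : Int) + 2)).foldl
            (fun d L => d.insert L (pvMostCommon5 (pvExtractPatterns tl L)))
            (PySem.Dict.empty : PySem.Dict Int (List (String × Int))),
         pvExtractPatterns tl ((k : Int) + 1)) := by
  intro k
  induction k with
  | zero =>
    have h12 : PySem.List.pyRange 1 (((0 : Nat) : Int) + 2) = [1] := by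
      rw [PySem.List.pyRange_one]
      norm_num
    rw [h12]
    simp only [List.foldl_cons, List.foldl_nil, pvAltStep]
    norm_num [pv_extract_one]
  | succ k ih =>
    have hc3 : ((k + 1 : Nat) + 2 : Int) = (k : Int) + 3 := by push_cast; ring
    have hsplit : PySem.List.pyRange 1 ((k + 1 : Nat) + 2 : Int) =
        PySem.List.pyRange 1 ((k : Int) + 2) ++ PySem.List.pyRange ((k : Int) + 2) ((k : Int) + 3) := by
      rw [hc3]
      exact PySem.List.pyRange_one_append 1 ((k : Int) + 2) ((k : Int) + 3) (by omega) (by omega)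
    have hlast : PySem.List.pyRange ((k : Int) + 2) ((k : Int) + 3) = [(k : Int) + 2] := by
      rw [PySem.List.pyRange_one]
      norm_num
    rw [hsplit, hlast, List.foldl_append, List.foldl_append, ih]
    simp only [List.foldl_cons, List.foldl_nil]
    have hne : (((k : Int) + 2) == (1 : Int)) = false := by
      rw [beq_eq_false_iff_ne]
      omega
    unfold pvAltStep
    simp only [hne, Bool.false_eq_true, if_false]
    have hw := pv_windows_step tl ((k : Int) + 2) (by omega)
    have heq : ((k : Int) + 2) - 1 = (k : Int) + 1 := by ring
    rw [heq] at hw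
    rw [hw]
    have hc2 : ((k + 1 : Nat) : Int) + 1 = (k : Int) + 2 := by push_cast; ring
    rw [hc2]

-- ===== VERDICT (by name: the statement is the Claim_ definition above) =====
theorem find_top_patterns_spec : Claim_equal_find_top_patterns := by
  intro tl maxL _
  unfold Spec_find_top_patterns find_top_patterns find_top_patterns_alt
  by_cases hpos : 1 ≤ maxL
  · have hk : maxL + 1 = ((maxL - 1).toNat : Int) + 2 := by omega
    rw [hk, pv_fold_inv]
  · have hempty : PySem.List.pyRange 1 (maxL + 1) = [] := by
      rw [PySem.List.pyRange_one]
      have : (maxL + 1 - 1).toNat = 0 := by omega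
      rw [this]
      simp
    rw [hempty]
    rfl
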